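-- pv_equiv track=rewrite | github.com/fandiandian/notepad_files_spam_1 | exercise.py | perm_k
-- ===== SOURCE A (Python) =====
-- def perm_k(s, k):
--     '''
--     输出 s 个元素中选取 k 个元素组成的所有排列
--     s --> string，为元素的母本
--     k --> int，选取的元素的个数
--     '''
--     # 参数判断
--     if k > len(s): return '参数错误'
--     # recursive basis
--     if k == 0: return ['']
--     # recursive chain
--     strings = []
--     for i in range(len(s)):
--         substrings = perm_k(s[:i]+s[i+1:], k-1)
--         for substring in substrings:
--             strings += [s[i] + substring]
--     return strings
-- ===== SOURCE B (Python) =====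
-- def perm_k(s, k):
--     if k > len(s): return '参数错误'
--     if k < 0: return []
--     # iterative level-by-level expansion: each level holds (prefix, remaining chars)
--     level = [("", s)]
--     for _ in range(k):
--         level = [(pre + rem[i], rem[:i] + rem[i+1:])
--                  for (pre, rem) in level for i in range(len(rem))]
--     return [pre for (pre, _) in level]
-- ===== Notes on version B (the rewrite author's own statement) =====
-- stated objective: alternative
-- what changed: Replaces A's recursion on k with string slicing and concatenation by an explicit iterative breadth-first expansion: a worklist of (prefix, remaining) pairs is expanded k times in one loop, then the prefixes are read off.
-- outside the precondition, e.g. on perm_k('ab', 3): A returns '参数错误', B returns '参数错误'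
import Mathlib
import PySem

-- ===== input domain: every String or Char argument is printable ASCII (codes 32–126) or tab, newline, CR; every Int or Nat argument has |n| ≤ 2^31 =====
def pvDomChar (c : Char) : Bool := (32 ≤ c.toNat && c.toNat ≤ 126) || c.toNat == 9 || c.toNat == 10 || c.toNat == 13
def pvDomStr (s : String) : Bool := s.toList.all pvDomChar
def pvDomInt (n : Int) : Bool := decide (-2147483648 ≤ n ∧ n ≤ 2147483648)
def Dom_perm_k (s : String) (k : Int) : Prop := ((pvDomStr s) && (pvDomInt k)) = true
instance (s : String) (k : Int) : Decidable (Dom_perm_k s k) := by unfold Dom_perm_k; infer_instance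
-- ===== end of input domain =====

-- B replaces A's recursion-with-slicing by an iterative breadth-first expansion (alternative decomposition).

-- ===== PORT A =====
-- A's recursion, over the character list; on the excluded `k > len(s)` branch (where the
-- Python returns the string '参数错误', not a list) the port returns [].
def permAC (cs : List Char) (k : Int) : List (List Char) :=
  if (cs.length : Int) < k then []
  else if k = 0 then [[]]
  else
    (List.range cs.length).attach.foldl (fun strings i =>
      let substrings := permAC (cs.take i.1 ++ cs.drop (i.1 + 1)) (k - 1)
      substrings.foldl (fun acc substring => acc ++ [cs.getD i.1 ' ' :: substring]) strings) []
termination_by cs.length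
decreasing_by
  have hi : i.1 < cs.length := by
    have := i.2; simpa [List.mem_range] using this
  simp only [List.length_append, List.length_take, List.length_drop]
  omega

def perm_k (s : String) (k : Int) : List String :=
  (permAC s.toList k).map (fun l => String.mk l)

-- ===== PORT B =====
-- one expansion round of B's loop: extend every (prefix, remaining) pair by each remaining char
def stepB (L : List (List Char × List Char)) : List (List Char × List Char) :=
  L.flatMap (fun pr =>
    (List.range pr.2.length).map (fun i =>
      (pr.1 ++ [pr.2.getD i ' '], pr.2.take i ++ pr.2.drop (i + 1))))

def perm_k_alt (s : String) (k : Int) : List String :=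
  if (s.toList.length : Int) < k then []        -- excluded branch ('参数错误' in the Python)
  else if k < 0 then []
  else
    ((List.range k.toNat).foldl (fun level _ => stepB level) [([], s.toList)]).map
      (fun pr => String.mk pr.1)

-- ===== PRECONDITION & SPEC =====
-- Pre_ excludes exactly k > len(s), where the Python A returns the string '参数错误'
-- instead of a list of strings (a value outside the declared return type).
def Pre_perm_k (s : String) (k : Int) : Prop := k ≤ (s.toList.length : Int)
instance (s : String) (k : Int) : Decidable (Pre_perm_k s k) := by unfold Pre_perm_k; infer_instance
def pvWitness_perm_k : String × Int := ("abc", 2)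

def Spec_perm_k (s : String) (k : Int) (out : List String) : Prop := out = perm_k_alt s k
instance (s : String) (k : Int) (out : List String) : Decidable (Spec_perm_k s k out) := by unfold Spec_perm_k; infer_instance

-- ===== CLAIM (what is proved, stated in full; the proofs are below) =====
def Claim_equal_perm_k : Prop := ∀ (s : String) (k : Int), Dom_perm_k s k → Pre_perm_k s k → Spec_perm_k s k (perm_k s k)

-- ===== LEMMAS AND PROOFS =====

-- negative k: A's recursion strips characters until the string is empty and the loop never appends
theorem permAC_neg : ∀ (n : Nat) (cs : List Char), cs.length ≤ n → ∀ k : Int, k < 0 → permAC cs k = [] := by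
  intro n
  induction n with
  | zero =>
    intro cs hcs k hk
    have : cs = [] := by cases cs <;> simp_all
    subst this
    rw [permAC]; simp; omega
  | succ n ih =>
    intro cs hcs k hk
    rw [permAC]
    have h1 : ¬ ((cs.length : Int) < k) := by omega
    have h2 : ¬ (k = 0) := by omega
    simp only [h1, if_false, h2]
    rw [PySem.List.foldl_congr_mem _ _ (fun (strings : List (List Char)) _ => strings) _ ?_]
    · exact PySem.List.foldl_ignore _ _
    · intro acc i hi
      have hi' : i.1 < cs.length := by
        have := i.2; simpa [List.mem_range] using this
      rw [ih (cs.take i.1 ++ cs.drop (i.1 + 1))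
            (by simp only [List.length_append, List.length_take, List.length_drop]; omega)
            (k - 1) (by omega)]
      simp

-- a foldl over `range n` that ignores the index is the n-fold iterate
theorem foldl_range_ignore {α : Type} (g : α → α) :
    ∀ (n : Nat) (L : α), (List.range n).foldl (fun l _ => g l) L = g^[n] L := by
  intro n
  induction n with
  | zero => intro L; simp
  | succ n ih =>
    intro L
    rw [List.range_succ, List.foldl_append, ih L]
    simp [Function.iterate_succ_apply']

theorem flatMap_congr_mem {α β : Type} (l : List α) (f g : α → List β)
    (h : ∀ x ∈ l, f x = g x) : l.flatMap f = l.flatMap g := by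
  induction l with
  | nil => rfl
  | cons a l ih =>
    simp only [List.flatMap_cons]
    rw [h a (by simp), ih (fun x hx => h x (by simp [hx]))]

theorem flatMap_attach {α β : Type} (l : List α) (h : α → List β) :
    l.attach.flatMap (fun i => h i.1) = l.flatMap h := by
  conv_rhs => rw [← List.attach_map_subtype_val l]
  rw [List.flatMap_map]

-- main invariant: n expansion rounds of B, read off prefixes, equal A's recursion at depth n
theorem stepB_iterate (n : Nat) :
    ∀ L : List (List Char × List Char), (∀ p ∈ L, n ≤ p.2.length) →
      (stepB^[n] L).map Prod.fst
        = L.flatMap (fun p => (permAC p.2 (n : Int)).map (fun sub => p.1 ++ sub)) := by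
  induction n with
  | zero =>
    intro L _
    have h0 : ∀ rem : List Char, permAC rem (0 : Int) = [[]] := by
      intro rem; rw [permAC]; simp
    simp [h0, List.map_eq_flatMap]
  | succ n ih =>
    intro L hL
    rw [Function.iterate_succ_apply]
    rw [ih (stepB L) ?_]
    · rw [stepB, List.flatMap_assoc]
      apply flatMap_congr_mem
      intro p hp
      have hlen : n + 1 ≤ p.2.length := hL p hp
      rw [List.flatMap_map]
      -- unfold A at depth n+1
      rw [permAC]
      have h1 : ¬ ((p.2.length : Int) < ((n : Int) + 1)) := by
        omega
      have h2 : ¬ (((n : Int) + 1) = 0) := by omega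
      simp only [Nat.cast_add, Nat.cast_one, h1, if_false, h2]
      -- inner foldl is acc ++ map, outer foldl over attach is a flatMap
      have hinner : ∀ (i : Nat) (strings : List (List Char)),
          (permAC (p.2.take i ++ p.2.drop (i + 1)) ((n : Int) + 1 - 1)).foldl
              (fun acc substring => acc ++ [p.2.getD i ' ' :: substring]) strings
            = strings ++ (permAC (p.2.take i ++ p.2.drop (i + 1)) (n : Int)).map
                (fun sub => p.2.getD i ' ' :: sub) := by
        intro i strings
        have : (n : Int) + 1 - 1 = (n : Int) := by ring
        rw [this, PySem.List.foldl_append_singleton_eq_map]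
      rw [PySem.List.foldl_congr_mem _ _
        (fun (strings : List (List Char)) (i : {x // x ∈ List.range p.2.length}) =>
          strings ++ (permAC (p.2.take i.1 ++ p.2.drop (i.1 + 1)) (n : Int)).map
            (fun sub => p.2.getD i.1 ' ' :: sub)) _
        (fun acc i _ => hinner i.1 acc)]
      rw [PySem.List.foldl_append_eq_flatMap, List.nil_append,
        flatMap_attach (List.range p.2.length)
          (fun i => (permAC (p.2.take i ++ p.2.drop (i + 1)) (n : Int)).map
            (fun sub => p.2.getD i ' ' :: sub))]
      rw [List.map_flatMap]
      apply flatMap_congr_mem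
      intro i _
      simp [Function.comp, List.map_map]
    · -- every pair in stepB L still has enough remaining characters
      intro q hq
      rw [stepB, List.mem_flatMap] at hq
      obtain ⟨p, hp, hq⟩ := hq
      rw [List.mem_map] at hq
      obtain ⟨i, hi, rfl⟩ := hq
      have hlen : n + 1 ≤ p.2.length := hL p hp
      have hi' : i < p.2.length := by simpa [List.mem_range] using hi
      simp only [List.length_append, List.length_take, List.length_drop]
      omega

-- ===== VERDICT (by name: the statement is the Claim_ definition above) =====
theorem perm_k_spec : Claim_equal_perm_k := by
  intro s k _ hpre
  unfold Spec_perm_k perm_k perm_k_alt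
  have hnl : ¬ ((s.toList.length : Int) < k) := by
    unfold Pre_perm_k at hpre; omega
  rw [if_neg hnl]
  by_cases hk : k < 0
  · rw [if_pos hk, permAC_neg s.toList.length s.toList le_rfl k hk]
    simp
  · rw [if_neg hk]
    have hk0 : (0 : Int) ≤ k := by omega
    have hkn : ((k.toNat : Nat) : Int) = k := Int.toNat_of_nonneg hk0
    rw [foldl_range_ignore]
    have hlen : k.toNat ≤ s.toList.length := by
      unfold Pre_perm_k at hpre; omega
    have h := stepB_iterate k.toNat [([], s.toList)] (by simpa using hlen)
    have hm : (stepB^[k.toNat] [(([] : List Char), s.toList)]).map (fun pr => String.mk pr.1)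
        = ((stepB^[k.toNat] [(([] : List Char), s.toList)]).map Prod.fst).map String.mk := by
      rw [List.map_map]; rfl
    rw [hm, h, hkn]
    simp
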